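-- pv_equiv track=rewrite | github.com/sahas-eashan/CTFs | m0leCon Teaser CTF/snek/game/path_utils.py | find_crash_sequence
-- ===== SOURCE A (Python) =====
-- DIRS = {
--     'W': (0,-1),
--     'S': (0,1),
--     'A': (-1,0),
--     'D': (1,0),
-- }
--
-- ACTIONS = ['.', 'W', 'A', 'S', 'D']
--
-- def step_state(snake, direction, action, apple):
--     dx, dy = direction
--     if action != '.':
--         ndx, ndy = DIRS[action]
--         if (ndx, ndy) != (-dx, -dy):
--             dx, dy = ndx, ndy
--     headx, heady = snake[0]
--     new_head = (headx + dx, heady + dy)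
--     mod_head = (new_head[0] % 10, new_head[1] % 10)
--     # build new snake
--     new_snake = [new_head] + snake
--     apple_hit = (mod_head == apple)
--     if not apple_hit:
--         new_snake = new_snake[:-1]
--     # check collision
--     for seg in new_snake[1:]:
--         if (seg[0] % 10, seg[1] % 10) == mod_head:
--             return None, (dx, dy), 'collision'
--     return new_snake, (dx, dy), 'apple' if apple_hit else 'ok'
--
-- def find_crash_sequence(snake, direction, apple, max_len=6):
--     from itertools import product
--     for length in range(1, max_len+1):
--         for seq in product(ACTIONS, repeat=length):
--             cur_snake = [tuple(s) for s in snake]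
--             cur_dir = direction
--             valid = True
--             for action in seq:
--                 cur_snake, cur_dir, status = step_state(cur_snake, cur_dir, action, apple)
--                 if status == 'collision':
--                     return list(seq)
--                 if status == 'apple':  # avoid sequences that eat apple
--                     valid = False
--                     break
--             if not valid:
--                 continue
--     return None
-- ===== SOURCE B (Python) =====
-- DIRS = {
--     'W': (0,-1),
--     'S': (0,1),
--     'A': (-1,0),
--     'D': (1,0),
-- }
--
-- ACTIONS = ['.', 'W', 'A', 'S', 'D']
--
-- def step_state(snake, direction, action, apple):
--     dx, dy = direction
--     if action != '.':
--         ndx, ndy = DIRS[action]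
--         if (ndx, ndy) != (-dx, -dy):
--             dx, dy = ndx, ndy
--     headx, heady = snake[0]
--     new_head = (headx + dx, heady + dy)
--     mod_head = (new_head[0] % 10, new_head[1] % 10)
--     new_snake = [new_head] + snake
--     apple_hit = (mod_head == apple)
--     if not apple_hit:
--         new_snake = new_snake[:-1]
--     for seg in new_snake[1:]:
--         if (seg[0] % 10, seg[1] % 10) == mod_head:
--             return None, (dx, dy), 'collision'
--     return new_snake, (dx, dy), 'apple' if apple_hit else 'ok'
--
-- def find_crash_sequence(snake, direction, apple, max_len=6):
--     # Breadth-first search over game states with prefix reuse: each surviving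
--     # (snake, direction) state is stepped once per action per level instead of
--     # re-simulating every full action sequence from scratch.
--     frontier = [([tuple(s) for s in snake], direction, [])]
--     for _ in range(max_len):
--         new_frontier = []
--         for st, d, seq in frontier:
--             for a in ACTIONS:
--                 ns, nd, status = step_state(st, d, a, apple)
--                 if status == 'collision':
--                     return seq + [a]
--                 if status == 'ok':
--                     new_frontier.append((ns, nd, seq + [a]))
--         frontier = new_frontier
--     return None
-- ===== Notes on version B (the rewrite author's own statement) =====
-- stated objective: faster
-- what changed: A re-simulates every full action sequence of every length from scratch (itertools.product per length); B does a breadth-first search over surviving (snake, direction) game states, stepping each surviving prefix once per action per level and dropping apple-eating prefixes from the frontier.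
-- outside the precondition, e.g. on find_crash_sequence([], (0, 1), (5, 5), 3): A raises IndexError, B raises IndexError
import Mathlib
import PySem

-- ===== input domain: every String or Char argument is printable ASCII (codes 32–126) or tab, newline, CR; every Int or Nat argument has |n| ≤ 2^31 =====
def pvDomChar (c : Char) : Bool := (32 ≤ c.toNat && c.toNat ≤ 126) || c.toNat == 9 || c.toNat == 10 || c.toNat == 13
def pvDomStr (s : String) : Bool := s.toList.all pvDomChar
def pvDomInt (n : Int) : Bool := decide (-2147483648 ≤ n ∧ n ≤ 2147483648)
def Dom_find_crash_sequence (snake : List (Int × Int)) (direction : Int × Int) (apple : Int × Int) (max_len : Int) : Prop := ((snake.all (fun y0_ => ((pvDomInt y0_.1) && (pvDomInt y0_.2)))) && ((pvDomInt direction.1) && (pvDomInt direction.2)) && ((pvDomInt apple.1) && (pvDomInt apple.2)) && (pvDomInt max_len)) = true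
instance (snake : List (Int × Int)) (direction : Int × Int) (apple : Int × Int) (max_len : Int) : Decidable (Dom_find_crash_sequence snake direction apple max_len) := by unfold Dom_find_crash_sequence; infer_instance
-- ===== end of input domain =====

-- B replaces A's re-simulation of every full action sequence (itertools.product per length)
-- by a breadth-first search over surviving game states with prefix reuse (objective: faster,
-- constant-factor: each surviving prefix is stepped once per action instead of re-run from scratch).

-- ===== PORT A =====
def pvDIRS : PySem.Dict String (Int × Int) := PySem.Dict.ofList [("W", (0, -1)), ("S", (0, 1)), ("A", (-1, 0)), ("D", (1, 0))]
def pvACTIONS : List String := [".", "W", "A", "S", "D"]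

-- step_state: shared helper of both Source A and Source B (identical source in both files);
-- its first three lines (the dx, dy update) are factored out as pvNewDir
def pvNewDir (direction : Int × Int) (action : String) : Int × Int :=
  if action ≠ "." then
    match PySem.Dict.get? pvDIRS action with
    | some nd => if nd ≠ (-direction.1, -direction.2) then nd else direction
    | none => direction   -- KeyError: unreachable, callers only pass actions from pvACTIONS
  else direction

def step_state (snake : List (Int × Int)) (direction : Int × Int) (action : String) (apple : Int × Int) :
    Option (Option (List (Int × Int)) × (Int × Int) × String) :=
  let d : Int × Int := pvNewDir direction action
  match PySem.List.pyGet? snake 0 with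
  | none => none            -- IndexError on snake[0] for empty snake (excluded by Pre_)
  | some head =>
    let new_head : Int × Int := (head.1 + d.1, head.2 + d.2)
    let mod_head : Int × Int := (PySem.Int.mod new_head.1 10, PySem.Int.mod new_head.2 10)
    let full : List (Int × Int) := new_head :: snake
    let apple_hit : Bool := decide (mod_head = apple)
    -- new_snake[:-1]: `full` is nonempty, so the Python slice is exactly dropLast
    let new_snake : List (Int × Int) := if apple_hit then full else full.dropLast
    -- 'for seg in new_snake[1:]: if …: return collision' = any over the tail
    if (new_snake.drop 1).any (fun seg => decide ((PySem.Int.mod seg.1 10, PySem.Int.mod seg.2 10) = mod_head)) then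
      some (none, d, "collision")
    else
      some (some new_snake, d, if apple_hit then "apple" else "ok")

-- itertools.product(ACTIONS, repeat=n) in product order (first coordinate slowest)
def pvProduct (n : Nat) : List (List String) :=
  match n with
  | 0 => [[]]
  | n + 1 => pvACTIONS.flatMap (fun a => (pvProduct n).map (fun s => a :: s))

-- A's inner 'for action in seq' loop: some true = returned seq (collision),
-- some false = loop left without returning (valid or apple-break), none = exception
def pvRunSeq (cur_snake : List (Int × Int)) (cur_dir : Int × Int) (apple : Int × Int) :
    List String → Option Bool
  | [] => some false
  | action :: rest =>
    match step_state cur_snake cur_dir action apple with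
    | none => none
    | some (ns, nd, status) =>
      if status = "collision" then some true
      else if status = "apple" then some false
      else pvRunSeq (ns.getD []) nd apple rest   -- status "ok": ns is always some here

-- A's 'for seq in product(…)' loop: some (some s) = return list(seq), some none = fell through
def pvScanSeqs (snake : List (Int × Int)) (direction : Int × Int) (apple : Int × Int) :
    List (List String) → Option (Option (List String))
  | [] => some none
  | seq :: rest =>
    match pvRunSeq snake direction apple seq with
    | none => none
    | some true => some (some seq)
    | some false => pvScanSeqs snake direction apple rest

-- A's 'for length in range(1, max_len+1)' loop (lengths are ≥ 1, so l.toNat is exact);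
-- a `none` from the scan is Python's IndexError (excluded by Pre_): the port returns none there
def pvLenLoop (snake : List (Int × Int)) (direction : Int × Int) (apple : Int × Int) :
    List Int → Option (List String)
  | [] => none
  | l :: rest =>
    match pvScanSeqs snake direction apple (pvProduct l.toNat) with
    | none => none
    | some (some s) => some s
    | some none => pvLenLoop snake direction apple rest

def find_crash_sequence (snake : List (Int × Int)) (direction : Int × Int) (apple : Int × Int) (max_len : Int) : Option (List String) :=
  pvLenLoop snake direction apple (PySem.List.pyRange 1 (max_len + 1) 1)

-- ===== PORT B =====
-- inner 'for a in ACTIONS' loop: inl = early return seq+[a], inr = collected ok-extensions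
def pvExpandEntry (apple : Int × Int) (st : List (Int × Int)) (d : Int × Int) (seq : List String) :
    List String → Option (Sum (List String) (List (List (Int × Int) × (Int × Int) × List String)))
  | [] => some (Sum.inr [])
  | a :: rest =>
    match step_state st d a apple with
    | none => none
    | some (ns, nd, status) =>
      if status = "collision" then some (Sum.inl (seq ++ [a]))
      else
        match pvExpandEntry apple st d seq rest with
        | none => none
        | some (Sum.inl ans) => some (Sum.inl ans)
        | some (Sum.inr more) =>
          some (Sum.inr (if status = "ok" then (ns.getD [], nd, seq ++ [a]) :: more else more))

-- 'for st, d, seq in frontier' loop, building new_frontier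
def pvExpandFrontier (apple : Int × Int) :
    List (List (Int × Int) × (Int × Int) × List String) →
    Option (Sum (List String) (List (List (Int × Int) × (Int × Int) × List String)))
  | [] => some (Sum.inr [])
  | (st, d, seq) :: rest =>
    match pvExpandEntry apple st d seq pvACTIONS with
    | none => none
    | some (Sum.inl ans) => some (Sum.inl ans)
    | some (Sum.inr exts) =>
      match pvExpandFrontier apple rest with
      | none => none
      | some (Sum.inl ans) => some (Sum.inl ans)
      | some (Sum.inr more) => some (Sum.inr (exts ++ more))

-- 'for _ in range(max_len)' level loop
def pvBfs (apple : Int × Int) : Nat → List (List (Int × Int) × (Int × Int) × List String) → Option (List String)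
  | 0, _ => none
  | fuel + 1, frontier =>
    match pvExpandFrontier apple frontier with
    | none => none
    | some (Sum.inl ans) => some ans
    | some (Sum.inr nf) => pvBfs apple fuel nf

def find_crash_sequence_alt (snake : List (Int × Int)) (direction : Int × Int) (apple : Int × Int) (max_len : Int) : Option (List String) :=
  pvBfs apple max_len.toNat [(snake, direction, [])]

-- ===== PRECONDITION & SPEC =====
-- Pre_ excludes only the inputs where A raises IndexError (empty snake with max_len ≥ 1:
-- snake[0] is read in step_state); B raises the same IndexError there.
def Pre_find_crash_sequence (snake : List (Int × Int)) (direction : Int × Int) (apple : Int × Int) (max_len : Int) : Prop :=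
  snake ≠ [] ∨ max_len < 1
instance (snake : List (Int × Int)) (direction : Int × Int) (apple : Int × Int) (max_len : Int) : Decidable (Pre_find_crash_sequence snake direction apple max_len) := by unfold Pre_find_crash_sequence; infer_instance

def pvWitness_find_crash_sequence : (List (Int × Int)) × (Int × Int) × (Int × Int) × Int :=
  ([(0, 0), (1, 0), (1, 1)], (-1, 0), (9, 9), 2)

def Spec_find_crash_sequence (snake : List (Int × Int)) (direction : Int × Int) (apple : Int × Int) (max_len : Int) (out : Option (List String)) : Prop := out = find_crash_sequence_alt snake direction apple max_len
instance (snake : List (Int × Int)) (direction : Int × Int) (apple : Int × Int) (max_len : Int) (out : Option (List String)) : Decidable (Spec_find_crash_sequence snake direction apple max_len out) := by unfold Spec_find_crash_sequence; infer_instance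

-- ===== CLAIM (what is proved, stated in full; the proofs are below) =====
def Claim_equal_find_crash_sequence : Prop := ∀ (snake : List (Int × Int)) (direction : Int × Int) (apple : Int × Int) (max_len : Int), Dom_find_crash_sequence snake direction apple max_len → Pre_find_crash_sequence snake direction apple max_len → Spec_find_crash_sequence snake direction apple max_len (find_crash_sequence snake direction apple max_len)

-- ===== LEMMAS AND PROOFS =====

-- proof-side helpers
-- all-"ok" run of a sequence: the resulting (snake, direction) state
def runOk (st : List (Int × Int)) (d : Int × Int) (apple : Int × Int) :
    List String → Option (List (Int × Int) × (Int × Int))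
  | [] => some (st, d)
  | a :: r =>
    match step_state st d a apple with
    | some (some ns, nd, status) => if status = "ok" then runOk ns nd apple r else none
    | _ => none

def collStep (st : List (Int × Int)) (d : Int × Int) (a : String) (apple : Int × Int) : Bool :=
  match step_state st d a apple with
  | some (_, _, s) => s == "collision"
  | none => false

def okEntry (sn : List (Int × Int)) (d : Int × Int) (ap : Int × Int) (q : List String) :
    Option (List (Int × Int) × (Int × Int) × List String) :=
  (runOk sn d ap q).map (fun sd => (sd.1, sd.2, q))

def extFn (p : List String) : List (List String) := pvACTIONS.map (fun a => p ++ [a])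

lemma step_shape (snake : List (Int × Int)) (d : Int × Int) (a : String) (apple : Int × Int)
    (h : snake ≠ []) :
    ∃ nd, step_state snake d a apple = some (none, nd, "collision") ∨
      ∃ ns, ns ≠ [] ∧ (step_state snake d a apple = some (some ns, nd, "apple") ∨
                       step_state snake d a apple = some (some ns, nd, "ok")) := by
  obtain ⟨x, s, rfl⟩ := List.exists_cons_of_ne_nil h
  simp only [step_state, PySem.List.pyGet?_zero_cons]
  refine ⟨pvNewDir d a, ?_⟩
  by_cases hc : (PySem.Int.mod (x.1 + (pvNewDir d a).1) 10, PySem.Int.mod (x.2 + (pvNewDir d a).2) 10) = apple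
  · simp only [hc, decide_true, if_true]
    split
    · exact Or.inl rfl
    · exact Or.inr ⟨_, List.cons_ne_nil _ _, Or.inl rfl⟩
  · simp only [hc, decide_false, Bool.false_eq_true, if_false]
    split
    · exact Or.inl rfl
    · refine Or.inr ⟨_, ?_, Or.inr rfl⟩
      simp [List.dropLast]

lemma runOk_nonempty (apple : Int × Int) :
    ∀ (p : List String) (st : List (Int × Int)) (d : Int × Int) s' d',
      st ≠ [] → runOk st d apple p = some (s', d') → s' ≠ [] := by
  intro p
  induction p with
  | nil =>
    intro st d s' d' h hr
    simp only [runOk, Option.some.injEq, Prod.mk.injEq] at hr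
    exact hr.1 ▸ h
  | cons a r ih =>
    intro st d s' d' h hr
    obtain ⟨nd, hcoll | ⟨ns, hne, hap | hok⟩⟩ := step_shape st d a apple h
    · simp [runOk, hcoll] at hr
    · simp [runOk, hap] at hr
    · simp only [runOk, hok] at hr
      simp at hr
      exact ih ns nd s' d' hne hr

lemma runOk_append (apple : Int × Int) :
    ∀ (p q : List String) (st : List (Int × Int)) (d : Int × Int),
      runOk st d apple (p ++ q) =
        match runOk st d apple p with
        | some (s', d') => runOk s' d' apple q
        | none => none := by
  intro p
  induction p with
  | nil => intro q st d; simp [runOk]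
  | cons a r ih =>
    intro q st d
    simp only [List.cons_append, runOk]
    rcases h : step_state st d a apple with _ | ⟨ns, nd, status⟩
    · rfl
    · rcases ns with _ | l
      · rfl
      · by_cases hs : status = "ok"
        · simp [hs, ih]
        · simp [hs]

lemma pvRunSeq_ne_none (apple : Int × Int) :
    ∀ (p : List String) (st : List (Int × Int)) (d : Int × Int),
      st ≠ [] → pvRunSeq st d apple p ≠ none := by
  intro p
  induction p with
  | nil => intro st d h; simp [pvRunSeq]
  | cons a r ih =>
    intro st d h
    obtain ⟨nd, hcoll | ⟨ns, hne, hap | hok⟩⟩ := step_shape st d a apple h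
    · simp [pvRunSeq, hcoll]
    · simp [pvRunSeq, hap]
    · simp only [pvRunSeq, hok]
      simpa using ih ns nd hne

lemma run_split (apple : Int × Int) :
    ∀ (p : List String) (a : String) (st : List (Int × Int)) (d : Int × Int),
      st ≠ [] →
      pvRunSeq st d apple (p ++ [a]) =
        match runOk st d apple p with
        | some (s', d') => if collStep s' d' a apple then some true else some false
        | none => pvRunSeq st d apple p := by
  intro p
  induction p with
  | nil =>
    intro a st d h
    obtain ⟨nd, hcoll | ⟨ns, hne, hap | hok⟩⟩ := step_shape st d a apple h
    · simp [pvRunSeq, runOk, collStep, hcoll]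
    · simp [pvRunSeq, runOk, collStep, hap]
    · simp [pvRunSeq, runOk, collStep, hok]
  | cons b r ih =>
    intro a st d h
    obtain ⟨nd, hcoll | ⟨ns, hne, hap | hok⟩⟩ := step_shape st d b apple h
    · simp [pvRunSeq, runOk, hcoll]
    · simp [pvRunSeq, runOk, hap]
    · simp only [List.cons_append, pvRunSeq, runOk, hok]
      simpa using ih a ns nd hne

lemma scan_ne_none (sn : List (Int × Int)) (dir : Int × Int) (ap : Int × Int) (h : sn ≠ []) :
    ∀ xs, pvScanSeqs sn dir ap xs ≠ none := by
  intro xs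
  induction xs with
  | nil => simp [pvScanSeqs]
  | cons p rest ih =>
    simp only [pvScanSeqs]
    rcases hr : pvRunSeq sn dir ap p with _ | b
    · exact absurd hr (pvRunSeq_ne_none ap p sn dir h)
    · cases b <;> simp [ih]

lemma scan_append (sn : List (Int × Int)) (dir : Int × Int) (ap : Int × Int) :
    ∀ xs ys, pvScanSeqs sn dir ap (xs ++ ys) =
      match pvScanSeqs sn dir ap xs with
      | some (some t) => some (some t)
      | some none => pvScanSeqs sn dir ap ys
      | none => none := by
  intro xs
  induction xs with
  | nil => intro ys; simp [pvScanSeqs]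
  | cons p rest ih =>
    intro ys
    simp only [List.cons_append, pvScanSeqs]
    rcases hr : pvRunSeq sn dir ap p with _ | b
    · rfl
    · cases b
      · exact ih ys
      · rfl

lemma scan_all_false (sn : List (Int × Int)) (dir : Int × Int) (ap : Int × Int) :
    ∀ xs, (∀ p ∈ xs, pvRunSeq sn dir ap p = some false) → pvScanSeqs sn dir ap xs = some none := by
  intro xs
  induction xs with
  | nil => intro _; simp [pvScanSeqs]
  | cons p rest ih =>
    intro hall
    simp only [pvScanSeqs, hall p (List.mem_cons_self ..)]
    exact ih (fun q hq => hall q (List.mem_cons_of_mem _ hq))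

lemma scan_some_none_mem (sn : List (Int × Int)) (dir : Int × Int) (ap : Int × Int) :
    ∀ xs, pvScanSeqs sn dir ap xs = some none → ∀ p ∈ xs, pvRunSeq sn dir ap p = some false := by
  intro xs
  induction xs with
  | nil => intro _ p hp; simp at hp
  | cons q rest ih =>
    intro hscan p hp
    simp only [pvScanSeqs] at hscan
    rcases hr : pvRunSeq sn dir ap q with _ | b <;> rw [hr] at hscan
    · simp at hscan
    · cases b
      · rcases List.mem_cons.mp hp with rfl | hp'
        · exact hr
        · exact ih hscan p hp'
      · simp at hscan

lemma pvProduct_snoc : ∀ n, pvProduct (n + 1) = (pvProduct n).flatMap extFn := by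
  intro n
  induction n with
  | zero =>
    show pvACTIONS.flatMap (fun a => [[a]]) = _
    simp [extFn, pvProduct, Eq.symm List.map_eq_flatMap]
  | succ n ih =>
    have h1 : pvProduct (n + 1 + 1) = pvACTIONS.flatMap (fun a => (pvProduct (n + 1)).map (fun s => a :: s)) := rfl
    have h2 : pvProduct (n + 1) = pvACTIONS.flatMap (fun a => (pvProduct n).map (fun s => a :: s)) := rfl
    conv_lhs => rw [h1, ih]
    rw [h2]
    simp [List.map_flatMap, List.flatMap_map, extFn, List.map_map, Function.comp_def, List.cons_append, List.flatMap_assoc]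

lemma entry_eq (sn : List (Int × Int)) (dir : Int × Int) (ap : Int × Int) (h0 : sn ≠ [])
    (p : List String) (s' : List (Int × Int)) (d' : Int × Int)
    (hp : runOk sn dir ap p = some (s', d')) :
    ∀ acts, pvExpandEntry ap s' d' p acts =
      some (match pvScanSeqs sn dir ap (acts.map (fun a => p ++ [a])) with
        | some (some s) => Sum.inl s
        | _ => Sum.inr ((acts.map (fun a => p ++ [a])).filterMap (okEntry sn dir ap))) := by
  intro acts
  induction acts with
  | nil => simp [pvExpandEntry, pvScanSeqs]
  | cons a rest ih =>
    have hs' : s' ≠ [] := runOk_nonempty ap p sn dir s' d' h0 hp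
    obtain ⟨nd, hcoll | ⟨ns, hne, hap | hok⟩⟩ := step_shape s' d' a ap hs'
    · have hrun : pvRunSeq sn dir ap (p ++ [a]) = some true := by
        rw [run_split ap p a sn dir h0, hp]
        simp [collStep, hcoll]
      simp only [pvExpandEntry, hcoll, List.map_cons, pvScanSeqs, hrun]
      simp
    · have hrun : pvRunSeq sn dir ap (p ++ [a]) = some false := by
        rw [run_split ap p a sn dir h0, hp]
        simp [collStep, hap]
      have hoke : okEntry sn dir ap (p ++ [a]) = none := by
        simp [okEntry, runOk_append ap p [a] sn dir, hp, runOk, hap]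
      simp only [pvExpandEntry, hap, List.map_cons, pvScanSeqs, hrun, List.filterMap_cons, hoke, ih]
      rcases hscan : pvScanSeqs sn dir ap (rest.map (fun a => p ++ [a])) with _ | (_ | t) <;> simp
    · have hrun : pvRunSeq sn dir ap (p ++ [a]) = some false := by
        rw [run_split ap p a sn dir h0, hp]
        simp [collStep, hok]
      have hoke : okEntry sn dir ap (p ++ [a]) = some (ns, nd, p ++ [a]) := by
        simp [okEntry, runOk_append ap p [a] sn dir, hp, runOk, hok]
      simp only [pvExpandEntry, hok, List.map_cons, pvScanSeqs, hrun, List.filterMap_cons, hoke, ih]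
      rcases hscan : pvScanSeqs sn dir ap (rest.map (fun a => p ++ [a])) with _ | (_ | t) <;> simp

lemma level_eq (sn : List (Int × Int)) (dir : Int × Int) (ap : Int × Int) (h0 : sn ≠ []) :
    ∀ (ps : List (List String)), (∀ p ∈ ps, pvRunSeq sn dir ap p = some false) →
      pvExpandFrontier ap (ps.filterMap (okEntry sn dir ap)) =
        some (match pvScanSeqs sn dir ap (ps.flatMap extFn) with
          | some (some s) => Sum.inl s
          | _ => Sum.inr ((ps.flatMap extFn).filterMap (okEntry sn dir ap))) := by
  intro ps
  induction ps with
  | nil => intro _; simp [pvExpandFrontier, pvScanSeqs]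
  | cons p rest ih =>
    intro hall
    have hp0 : pvRunSeq sn dir ap p = some false := hall p (List.mem_cons_self ..)
    have hrest : ∀ q ∈ rest, pvRunSeq sn dir ap q = some false :=
      fun q hq => hall q (List.mem_cons_of_mem _ hq)
    simp only [List.flatMap_cons, List.filterMap_cons, extFn]
    rcases hro : runOk sn dir ap p with _ | ⟨s', d'⟩
    · have hextfalse : ∀ q ∈ pvACTIONS.map (fun a => p ++ [a]), pvRunSeq sn dir ap q = some false := by
        intro q hq
        obtain ⟨a, _, rfl⟩ := List.mem_map.mp hq
        rw [run_split ap p a sn dir h0, hro]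
        exact hp0
      have hscan1 : pvScanSeqs sn dir ap (pvACTIONS.map (fun a => p ++ [a])) = some none :=
        scan_all_false sn dir ap _ hextfalse
      have hfm : (pvACTIONS.map (fun a => p ++ [a])).filterMap (okEntry sn dir ap) = [] := by
        rw [List.filterMap_eq_nil_iff]
        intro q hq
        obtain ⟨a, _, rfl⟩ := List.mem_map.mp hq
        simp [okEntry, runOk_append ap p [a] sn dir, hro]
      have hoke : okEntry sn dir ap p = none := by simp [okEntry, hro]
      simp only [hoke]
      rw [ih hrest, scan_append, hscan1, List.filterMap_append, hfm]
      rcases hscan2 : pvScanSeqs sn dir ap (rest.flatMap extFn) with _ | (_ | t) <;> simp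
    · have hoke : okEntry sn dir ap p = some (s', d', p) := by simp [okEntry, hro]
      simp only [hoke, pvExpandFrontier]
      rw [entry_eq sn dir ap h0 p s' d' hro pvACTIONS]
      rcases hscan1 : pvScanSeqs sn dir ap (pvACTIONS.map (fun a => p ++ [a])) with _ | (_ | t)
      · exact absurd hscan1 (scan_ne_none sn dir ap h0 _)
      · rw [ih hrest, scan_append, hscan1, List.filterMap_append]
        rcases hscan2 : pvScanSeqs sn dir ap (rest.flatMap extFn) with _ | (_ | t) <;> simp
      · rw [scan_append, hscan1]

lemma main_eq (sn : List (Int × Int)) (dir : Int × Int) (ap : Int × Int) (h0 : sn ≠ []) :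
    ∀ (f k : Nat), (∀ p ∈ pvProduct k, pvRunSeq sn dir ap p = some false) →
      pvLenLoop sn dir ap (PySem.List.pyRange ((k : Int) + 1) ((k : Int) + 1 + (f : Int)) 1) =
        pvBfs ap f ((pvProduct k).filterMap (okEntry sn dir ap)) := by
  intro f
  induction f with
  | zero =>
    intro k hk
    rw [show (k : Int) + 1 + ((0 : Nat) : Int) = (k : Int) + 1 by push_cast; ring]
    rw [PySem.List.pyRange_one_eq_nil (by omega)]
    simp [pvLenLoop, pvBfs]
  | succ f ih =>
    intro k hk
    rw [PySem.List.pyRange_one_cons (by push_cast; omega)]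
    simp only [pvLenLoop]
    have ht : ((k : Int) + 1).toNat = k + 1 := by omega
    rw [ht, pvProduct_snoc k]
    have hlev := level_eq sn dir ap h0 (pvProduct k) hk
    rcases hscan : pvScanSeqs sn dir ap ((pvProduct k).flatMap extFn) with _ | (_ | t)
    · exact absurd hscan (scan_ne_none sn dir ap h0 _)
    · have hk1 : ∀ p ∈ pvProduct (k + 1), pvRunSeq sn dir ap p = some false := by
        rw [pvProduct_snoc k]
        exact scan_some_none_mem sn dir ap _ hscan
      have e1 : (k : Int) + 1 + 1 = ((k + 1 : Nat) : Int) + 1 := by push_cast; ring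
      have e2 : (k : Int) + 1 + ((f + 1 : Nat) : Int) = ((k + 1 : Nat) : Int) + 1 + (f : Int) := by
        push_cast; ring
      simp only [pvBfs, hlev, hscan]
      rw [e1, e2, ih (k + 1) hk1, pvProduct_snoc k]
    · simp only [pvBfs, hlev, hscan]

-- ===== VERDICT (by name: the statement is the Claim_ definition above) =====
theorem find_crash_sequence_spec : Claim_equal_find_crash_sequence := by
  intro snake direction apple max_len _ hpre
  unfold Spec_find_crash_sequence
  unfold find_crash_sequence find_crash_sequence_alt
  by_cases hml : max_len < 1
  · rw [PySem.List.pyRange_one_eq_nil (by omega)]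
    have h0 : max_len.toNat = 0 := by omega
    rw [h0]
    simp [pvLenLoop, pvBfs]
  · have h0 : snake ≠ [] := by
      rcases hpre with h | h
      · exact h
      · omega
    have hk0 : ∀ p ∈ pvProduct 0, pvRunSeq snake direction apple p = some false := by
      intro p hp
      simp only [pvProduct, List.mem_singleton] at hp
      subst hp
      rfl
    have hm := main_eq snake direction apple h0 max_len.toNat 0 hk0
    have e1 : ((0 : Nat) : Int) + 1 = 1 := by norm_num
    have e2 : (1 : Int) + (max_len.toNat : Int) = max_len + 1 := by omega
    rw [e1, e2] at hm
    rw [hm]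
    congr 1
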